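-- pv_equiv track=rewrite | github.com/docToolchain/aoc-2021 | day19/python/quajak/nineteen.py | _rotate_coordinate
-- ===== SOURCE A (Python) =====
-- from typing import List, Tuple
--
-- def _rotate_coordinate(coord: List[int], rx: int, ry: int, rz: int) -> Tuple[int]:
--     vec = tuple(coord)
--     for i in range(rx):
--         vec = (vec[0], -1 * vec[2], vec[1])
--
--     for i in range(ry):
--         vec = (vec[2], vec[1], vec[0] * -1)
--
--     for i in range(rz):
--         vec = (vec[1] * -1, vec[0], vec[2])
--     return vec
-- ===== SOURCE B (Python) =====
-- def _turned(vec, turns, r):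
--     """Apply r quarter-turns about one axis: a count of zero or less turns
--     nothing, and the turn has period four, so only r % 4 matters."""
--     if r <= 0:
--         return vec
--     x, y, z = vec[0], vec[1], vec[2]
--     return turns[r % 4](x, y, z)
--
-- X_TURNS = (lambda x, y, z: (x, y, z),
--            lambda x, y, z: (x, -z, y),
--            lambda x, y, z: (x, -y, -z),
--            lambda x, y, z: (x, z, -y))
-- Y_TURNS = (lambda x, y, z: (x, y, z),
--            lambda x, y, z: (z, y, -x),
--            lambda x, y, z: (-x, y, -z),
--            lambda x, y, z: (-z, y, x))
-- Z_TURNS = (lambda x, y, z: (x, y, z),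
--            lambda x, y, z: (-y, x, z),
--            lambda x, y, z: (-x, -y, z),
--            lambda x, y, z: (y, -x, z))
--
-- def _rotate_coordinate(coord, rx, ry, rz):
--     vec = tuple(coord)
--     vec = _turned(vec, X_TURNS, rx)
--     vec = _turned(vec, Y_TURNS, ry)
--     vec = _turned(vec, Z_TURNS, rz)
--     return vec
-- ===== Notes on version B (the rewrite author's own statement) =====
-- stated objective: faster
-- what changed: B replaces A's three loops of rx+ry+rz successive quarter-turns by one table lookup per axis using the period-4 cyclicity of a quarter-turn (r % 4); Pre_ only excludes the inputs where A raises IndexError (coord shorter than 3 with a positive turn count).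
import Mathlib
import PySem

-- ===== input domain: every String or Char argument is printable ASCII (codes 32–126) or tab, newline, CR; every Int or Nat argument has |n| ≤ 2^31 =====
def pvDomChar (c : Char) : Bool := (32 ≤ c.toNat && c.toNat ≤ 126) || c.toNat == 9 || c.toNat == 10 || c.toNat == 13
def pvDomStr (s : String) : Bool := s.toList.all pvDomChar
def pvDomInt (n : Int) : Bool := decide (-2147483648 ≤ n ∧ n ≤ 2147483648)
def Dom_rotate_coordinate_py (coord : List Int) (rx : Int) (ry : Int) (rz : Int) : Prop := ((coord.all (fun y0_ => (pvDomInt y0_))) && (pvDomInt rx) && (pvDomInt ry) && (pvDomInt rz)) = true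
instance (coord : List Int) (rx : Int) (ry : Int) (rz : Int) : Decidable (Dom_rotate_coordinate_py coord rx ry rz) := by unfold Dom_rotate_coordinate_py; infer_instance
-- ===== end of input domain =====

-- B replaces A's O(rx+ry+rz) quarter-turn loops by one O(1) table lookup per axis
-- using the period-4 cyclicity of a quarter-turn.

-- ===== PORT A =====
-- one x-quarter-turn: vec = (vec[0], -1 * vec[2], vec[1])  (pyGetD is exact under Pre_)
def stepX (v : List Int) : List Int :=
  [PySem.List.pyGetD v 0 0, -1 * PySem.List.pyGetD v 2 0, PySem.List.pyGetD v 1 0]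
-- vec = (vec[2], vec[1], vec[0] * -1)
def stepY (v : List Int) : List Int :=
  [PySem.List.pyGetD v 2 0, PySem.List.pyGetD v 1 0, PySem.List.pyGetD v 0 0 * -1]
-- vec = (vec[1] * -1, vec[0], vec[2])
def stepZ (v : List Int) : List Int :=
  [PySem.List.pyGetD v 1 0 * -1, PySem.List.pyGetD v 0 0, PySem.List.pyGetD v 2 0]

def rotate_coordinate_py (coord : List Int) (rx : Int) (ry : Int) (rz : Int) : List Int :=
  let v1 := stepX^[rx.toNat] coord
  let v2 := stepY^[ry.toNat] v1
  stepZ^[rz.toNat] v2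

-- ===== PORT B =====
-- _turned(vec, X_TURNS, r): no turn for r <= 0, else the lambda table at r % 4
-- (the three TURNS tables are inlined as the branch on k, one def per axis)
def turnX (v : List Int) (r : Int) : List Int :=
  if r ≤ 0 then v else
  let x := PySem.List.pyGetD v 0 0
  let y := PySem.List.pyGetD v 1 0
  let z := PySem.List.pyGetD v 2 0
  let k := PySem.Int.mod r 4
  if k = 1 then [x, -z, y] else if k = 2 then [x, -y, -z]
  else if k = 3 then [x, z, -y] else [x, y, z]

def turnY (v : List Int) (r : Int) : List Int :=
  if r ≤ 0 then v else
  let x := PySem.List.pyGetD v 0 0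
  let y := PySem.List.pyGetD v 1 0
  let z := PySem.List.pyGetD v 2 0
  let k := PySem.Int.mod r 4
  if k = 1 then [z, y, -x] else if k = 2 then [-x, y, -z]
  else if k = 3 then [-z, y, x] else [x, y, z]

def turnZ (v : List Int) (r : Int) : List Int :=
  if r ≤ 0 then v else
  let x := PySem.List.pyGetD v 0 0
  let y := PySem.List.pyGetD v 1 0
  let z := PySem.List.pyGetD v 2 0
  let k := PySem.Int.mod r 4
  if k = 1 then [-y, x, z] else if k = 2 then [-x, -y, z]
  else if k = 3 then [y, -x, z] else [x, y, z]

def rotate_coordinate_py_alt (coord : List Int) (rx : Int) (ry : Int) (rz : Int) : List Int :=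
  let v1 := turnX coord rx
  let v2 := turnY v1 ry
  turnZ v2 rz

-- ===== PRECONDITION & SPEC =====
-- Pre_ excludes exactly the inputs where A raises IndexError: a coord of length < 3
-- together with at least one positive rotation count (B raises there too).
def Pre_rotate_coordinate_py (coord : List Int) (rx : Int) (ry : Int) (rz : Int) : Prop :=
  3 ≤ coord.length ∨ (rx ≤ 0 ∧ ry ≤ 0 ∧ rz ≤ 0)
instance (coord : List Int) (rx : Int) (ry : Int) (rz : Int) : Decidable (Pre_rotate_coordinate_py coord rx ry rz) := by unfold Pre_rotate_coordinate_py; infer_instance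
def pvWitness_rotate_coordinate_py : List Int × Int × Int × Int := ([1, 2, 3], 1, 2, 3)

def Spec_rotate_coordinate_py (coord : List Int) (rx : Int) (ry : Int) (rz : Int) (out : List Int) : Prop := out = rotate_coordinate_py_alt coord rx ry rz
instance (coord : List Int) (rx : Int) (ry : Int) (rz : Int) (out : List Int) : Decidable (Spec_rotate_coordinate_py coord rx ry rz out) := by unfold Spec_rotate_coordinate_py; infer_instance

-- ===== CLAIM (what is proved, stated in full; the proofs are below) =====
def Claim_equal_rotate_coordinate_py : Prop := ∀ (coord : List Int) (rx : Int) (ry : Int) (rz : Int), Dom_rotate_coordinate_py coord rx ry rz → Pre_rotate_coordinate_py coord rx ry rz → Spec_rotate_coordinate_py coord rx ry rz (rotate_coordinate_py coord rx ry rz)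

-- ===== LEMMAS AND PROOFS =====

theorem stepX_cons (a b c : Int) (r : List Int) : stepX (a :: b :: c :: r) = [a, -c, b] := by
  simp [stepX, PySem.List.pyGetD_ofNat', List.getD]

theorem stepY_cons (a b c : Int) (r : List Int) : stepY (a :: b :: c :: r) = [c, b, -a] := by
  simp [stepY, PySem.List.pyGetD_ofNat', List.getD]

theorem stepZ_cons (a b c : Int) (r : List Int) : stepZ (a :: b :: c :: r) = [-b, a, c] := by
  simp [stepZ, PySem.List.pyGetD_ofNat', List.getD]

theorem turnX_cons (a b c : Int) (rest : List Int) (r : Int) (hr : 0 < r) :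
    turnX (a :: b :: c :: rest) r =
      (if PySem.Int.mod r 4 = 1 then [a, -c, b] else if PySem.Int.mod r 4 = 2 then [a, -b, -c]
       else if PySem.Int.mod r 4 = 3 then [a, c, -b] else [a, b, c]) := by
  rw [turnX, if_neg (by omega)]
  simp [PySem.List.pyGetD_ofNat', List.getD]

theorem turnY_cons (a b c : Int) (rest : List Int) (r : Int) (hr : 0 < r) :
    turnY (a :: b :: c :: rest) r =
      (if PySem.Int.mod r 4 = 1 then [c, b, -a] else if PySem.Int.mod r 4 = 2 then [-a, b, -c]
       else if PySem.Int.mod r 4 = 3 then [-c, b, a] else [a, b, c]) := by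
  rw [turnY, if_neg (by omega)]
  simp [PySem.List.pyGetD_ofNat', List.getD]

theorem turnZ_cons (a b c : Int) (rest : List Int) (r : Int) (hr : 0 < r) :
    turnZ (a :: b :: c :: rest) r =
      (if PySem.Int.mod r 4 = 1 then [-b, a, c] else if PySem.Int.mod r 4 = 2 then [-a, -b, c]
       else if PySem.Int.mod r 4 = 3 then [b, -a, c] else [a, b, c]) := by
  rw [turnZ, if_neg (by omega)]
  simp [PySem.List.pyGetD_ofNat', List.getD]

theorem exists_cons3 (v : List Int) (h : 3 ≤ v.length) :
    ∃ a b c r, v = a :: b :: c :: r := by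
  rcases v with _ | ⟨a, _ | ⟨b, _ | ⟨c, r⟩⟩⟩ <;> simp_all

theorem mod_cast_toNat (rx : Int) (hx : 0 < rx) :
    ((rx.toNat % 4 : Nat) : Int) = PySem.Int.mod rx 4 := by
  rw [PySem.Int.mod_eq_emod_of_pos (show (0:Int) < 4 by omega)]
  omega

theorem iterX_eq (n : Nat) : ∀ (v : List Int), 3 ≤ v.length → 1 ≤ n →
    stepX^[n] v =
      (if ((n % 4 : Nat) : Int) = 1 then [PySem.List.pyGetD v 0 0, -PySem.List.pyGetD v 2 0, PySem.List.pyGetD v 1 0]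
       else if ((n % 4 : Nat) : Int) = 2 then [PySem.List.pyGetD v 0 0, -PySem.List.pyGetD v 1 0, -PySem.List.pyGetD v 2 0]
       else if ((n % 4 : Nat) : Int) = 3 then [PySem.List.pyGetD v 0 0, PySem.List.pyGetD v 2 0, -PySem.List.pyGetD v 1 0]
       else [PySem.List.pyGetD v 0 0, PySem.List.pyGetD v 1 0, PySem.List.pyGetD v 2 0]) := by
  induction n using Nat.strong_induction_on with
  | _ n ih =>
    intro v hv hn
    obtain ⟨a, b, c, r, rfl⟩ := exists_cons3 v hv
    match n, hn with
    | 1, _ => simp [stepX_cons, PySem.List.pyGetD_ofNat', List.getD]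
    | 2, _ => simp [Function.iterate_succ_apply, stepX_cons, PySem.List.pyGetD_ofNat', List.getD]
    | 3, _ => simp [Function.iterate_succ_apply, stepX_cons, PySem.List.pyGetD_ofNat', List.getD]
    | 4, _ => simp [Function.iterate_succ_apply, stepX_cons, PySem.List.pyGetD_ofNat', List.getD]
    | (m+5), _ =>
      have per : ∀ p q s : Int, stepX^[4] [p, q, s] = [p, q, s] := by
        intro p q s
        simp [Function.iterate_succ_apply, stepX_cons]
      have h4 : stepX^[m+5] (a :: b :: c :: r) = stepX^[4] (stepX^[m+1] (a :: b :: c :: r)) := by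
        rw [show m+5 = 4+(m+1) by omega, Function.iterate_add_apply]
      rw [h4, ih (m+1) (by omega) _ (by simp only [List.length_cons]; omega) (by omega),
          show ((m+5) % 4 : Nat) = ((m+1) % 4 : Nat) by omega]
      split_ifs <;> exact per _ _ _

theorem iterY_eq (n : Nat) : ∀ (v : List Int), 3 ≤ v.length → 1 ≤ n →
    stepY^[n] v =
      (if ((n % 4 : Nat) : Int) = 1 then [PySem.List.pyGetD v 2 0, PySem.List.pyGetD v 1 0, -PySem.List.pyGetD v 0 0]
       else if ((n % 4 : Nat) : Int) = 2 then [-PySem.List.pyGetD v 0 0, PySem.List.pyGetD v 1 0, -PySem.List.pyGetD v 2 0]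
       else if ((n % 4 : Nat) : Int) = 3 then [-PySem.List.pyGetD v 2 0, PySem.List.pyGetD v 1 0, PySem.List.pyGetD v 0 0]
       else [PySem.List.pyGetD v 0 0, PySem.List.pyGetD v 1 0, PySem.List.pyGetD v 2 0]) := by
  induction n using Nat.strong_induction_on with
  | _ n ih =>
    intro v hv hn
    obtain ⟨a, b, c, r, rfl⟩ := exists_cons3 v hv
    match n, hn with
    | 1, _ => simp [stepY_cons, PySem.List.pyGetD_ofNat', List.getD]
    | 2, _ => simp [Function.iterate_succ_apply, stepY_cons, PySem.List.pyGetD_ofNat', List.getD]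
    | 3, _ => simp [Function.iterate_succ_apply, stepY_cons, PySem.List.pyGetD_ofNat', List.getD]
    | 4, _ => simp [Function.iterate_succ_apply, stepY_cons, PySem.List.pyGetD_ofNat', List.getD]
    | (m+5), _ =>
      have per : ∀ p q s : Int, stepY^[4] [p, q, s] = [p, q, s] := by
        intro p q s
        simp [Function.iterate_succ_apply, stepY_cons]
      have h4 : stepY^[m+5] (a :: b :: c :: r) = stepY^[4] (stepY^[m+1] (a :: b :: c :: r)) := by
        rw [show m+5 = 4+(m+1) by omega, Function.iterate_add_apply]
      rw [h4, ih (m+1) (by omega) _ (by simp only [List.length_cons]; omega) (by omega),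
          show ((m+5) % 4 : Nat) = ((m+1) % 4 : Nat) by omega]
      split_ifs <;> exact per _ _ _

theorem iterZ_eq (n : Nat) : ∀ (v : List Int), 3 ≤ v.length → 1 ≤ n →
    stepZ^[n] v =
      (if ((n % 4 : Nat) : Int) = 1 then [-PySem.List.pyGetD v 1 0, PySem.List.pyGetD v 0 0, PySem.List.pyGetD v 2 0]
       else if ((n % 4 : Nat) : Int) = 2 then [-PySem.List.pyGetD v 0 0, -PySem.List.pyGetD v 1 0, PySem.List.pyGetD v 2 0]
       else if ((n % 4 : Nat) : Int) = 3 then [PySem.List.pyGetD v 1 0, -PySem.List.pyGetD v 0 0, PySem.List.pyGetD v 2 0]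
       else [PySem.List.pyGetD v 0 0, PySem.List.pyGetD v 1 0, PySem.List.pyGetD v 2 0]) := by
  induction n using Nat.strong_induction_on with
  | _ n ih =>
    intro v hv hn
    obtain ⟨a, b, c, r, rfl⟩ := exists_cons3 v hv
    match n, hn with
    | 1, _ => simp [stepZ_cons, PySem.List.pyGetD_ofNat', List.getD]
    | 2, _ => simp [Function.iterate_succ_apply, stepZ_cons, PySem.List.pyGetD_ofNat', List.getD]
    | 3, _ => simp [Function.iterate_succ_apply, stepZ_cons, PySem.List.pyGetD_ofNat', List.getD]
    | 4, _ => simp [Function.iterate_succ_apply, stepZ_cons, PySem.List.pyGetD_ofNat', List.getD]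
    | (m+5), _ =>
      have per : ∀ p q s : Int, stepZ^[4] [p, q, s] = [p, q, s] := by
        intro p q s
        simp [Function.iterate_succ_apply, stepZ_cons]
      have h4 : stepZ^[m+5] (a :: b :: c :: r) = stepZ^[4] (stepZ^[m+1] (a :: b :: c :: r)) := by
        rw [show m+5 = 4+(m+1) by omega, Function.iterate_add_apply]
      rw [h4, ih (m+1) (by omega) _ (by simp only [List.length_cons]; omega) (by omega),
          show ((m+5) % 4 : Nat) = ((m+1) % 4 : Nat) by omega]
      split_ifs <;> exact per _ _ _

-- one axis stage of A equals one axis stage of B, for coords of length ≥ 3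
theorem stageX (coord : List Int) (rx : Int) (h : 3 ≤ coord.length) :
    stepX^[rx.toNat] coord = turnX coord rx := by
  by_cases hx : rx ≤ 0
  · have : rx.toNat = 0 := by omega
    rw [turnX, if_pos hx, this, Function.iterate_zero_apply]
  · obtain ⟨a, b, c, r, rfl⟩ := exists_cons3 coord h
    rw [iterX_eq rx.toNat _ h (by omega), turnX_cons a b c r rx (by omega),
        ← mod_cast_toNat rx (by omega)]
    simp [PySem.List.pyGetD_ofNat', List.getD]

theorem stageY (coord : List Int) (ry : Int) (h : 3 ≤ coord.length) :
    stepY^[ry.toNat] coord = turnY coord ry := by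
  by_cases hy : ry ≤ 0
  · have : ry.toNat = 0 := by omega
    rw [turnY, if_pos hy, this, Function.iterate_zero_apply]
  · obtain ⟨a, b, c, r, rfl⟩ := exists_cons3 coord h
    rw [iterY_eq ry.toNat _ h (by omega), turnY_cons a b c r ry (by omega),
        ← mod_cast_toNat ry (by omega)]
    simp [PySem.List.pyGetD_ofNat', List.getD]

theorem stageZ (coord : List Int) (rz : Int) (h : 3 ≤ coord.length) :
    stepZ^[rz.toNat] coord = turnZ coord rz := by
  by_cases hz : rz ≤ 0
  · have : rz.toNat = 0 := by omega
    rw [turnZ, if_pos hz, this, Function.iterate_zero_apply]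
  · obtain ⟨a, b, c, r, rfl⟩ := exists_cons3 coord h
    rw [iterZ_eq rz.toNat _ h (by omega), turnZ_cons a b c r rz (by omega),
        ← mod_cast_toNat rz (by omega)]
    simp [PySem.List.pyGetD_ofNat', List.getD]

theorem turnX_len (v : List Int) (r : Int) (h : 3 ≤ v.length) : 3 ≤ (turnX v r).length := by
  rw [turnX]; split_ifs <;> simp_all <;> split_ifs <;> simp

theorem turnY_len (v : List Int) (r : Int) (h : 3 ≤ v.length) : 3 ≤ (turnY v r).length := by
  rw [turnY]; split_ifs <;> simp_all <;> split_ifs <;> simp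

-- ===== VERDICT (by name: the statement is the Claim_ definition above) =====
theorem rotate_coordinate_py_spec : Claim_equal_rotate_coordinate_py := by
  intro coord rx ry rz _ hpre
  unfold Spec_rotate_coordinate_py rotate_coordinate_py rotate_coordinate_py_alt
  show stepZ^[rz.toNat] (stepY^[ry.toNat] (stepX^[rx.toNat] coord)) =
    turnZ (turnY (turnX coord rx) ry) rz
  rcases hpre with h3 | ⟨hx, hy, hz⟩
  · rw [stageX coord rx h3, stageY _ ry (turnX_len coord rx h3),
        stageZ _ rz (turnY_len _ ry (turnX_len coord rx h3))]
  · have h1 : rx.toNat = 0 := by omega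
    have h2 : ry.toNat = 0 := by omega
    have h3 : rz.toNat = 0 := by omega
    show stepZ^[rz.toNat] (stepY^[ry.toNat] (stepX^[rx.toNat] coord)) =
      turnZ (turnY (turnX coord rx) ry) rz
    rw [h1, h2, h3]
    simp only [Function.iterate_zero_apply]
    rw [turnX, if_pos hx, turnY, if_pos hy, turnZ, if_pos hz]
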